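-- pv_equiv track=rewrite | github.com/BelfodilAimene/CbOImplications | complexData.py | interordinal_scale
-- ===== SOURCE A (Python) =====
-- def interordinal_scale(column_name, column_values):
--     sorted_values = sorted(set(column_values))
--     value_to_indice_per_column = {value:i for i, value in enumerate(sorted_values)}
--
--     result=[]
--     implications = set()
--     for i in range(len(sorted_values)-1):
--         implications.add((column_name+"<="+str(sorted_values[i]),column_name+"<="+str(sorted_values[i+1])))
--         implications.add((column_name+">="+str(sorted_values[i+1]),column_name+">="+str(sorted_values[i])))
--
--     for value in column_values:
--         new_value = set()
--         indice = value_to_indice_per_column[value]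
--         for i in range(indice+1):
--             new_value.add(column_name+">="+str(sorted_values[i]))
--         for i in range(indice, len(value_to_indice_per_column)):
--             new_value.add(column_name+"<="+str(sorted_values[i]))
--         result.append(sorted(new_value))
--
--
--     return result, implications
-- ===== SOURCE B (Python) =====
-- def interordinal_scale(column_name, column_values):
--     sorted_values = sorted(set(column_values))
--     ge = [column_name + ">=" + str(v) for v in sorted_values]
--     le = [column_name + "<=" + str(v) for v in sorted_values]
--     # one precomputed attribute row per distinct-value index, shared by duplicates
--     rows = [sorted(set(ge[:k + 1] + le[k:])) for k in range(len(sorted_values))]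
--     index = {v: k for k, v in enumerate(sorted_values)}
--     result = [rows[index[v]] for v in column_values]
--     implications = set()
--     for small, big in zip(sorted_values, sorted_values[1:]):
--         implications.add((column_name + "<=" + str(small), column_name + "<=" + str(big)))
--         implications.add((column_name + ">=" + str(big), column_name + ">=" + str(small)))
--     return result, implications
-- ===== Notes on version B (the rewrite author's own statement) =====
-- stated objective: alternative
-- what changed: Instead of rebuilding each element's attribute set with two inner index loops per occurrence, B precomputes the '>=' and '<=' attribute lists once, builds one sorted row per distinct value by slicing them, and maps every (possibly duplicate) column value to its precomputed row via an index dict; implications come from zipping adjacent sorted values.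
import Mathlib
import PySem

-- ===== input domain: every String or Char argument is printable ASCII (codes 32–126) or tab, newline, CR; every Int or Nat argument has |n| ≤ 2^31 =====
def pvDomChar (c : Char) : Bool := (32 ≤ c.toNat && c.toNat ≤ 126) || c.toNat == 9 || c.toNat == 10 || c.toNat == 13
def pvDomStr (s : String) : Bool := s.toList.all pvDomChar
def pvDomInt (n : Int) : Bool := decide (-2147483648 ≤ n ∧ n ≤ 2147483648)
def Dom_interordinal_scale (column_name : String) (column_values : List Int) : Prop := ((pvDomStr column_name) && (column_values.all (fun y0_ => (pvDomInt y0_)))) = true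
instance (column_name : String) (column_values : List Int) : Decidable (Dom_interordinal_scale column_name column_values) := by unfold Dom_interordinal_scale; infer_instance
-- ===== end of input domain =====

-- B precomputes one attribute row per distinct value by slicing prebuilt attribute lists and shares it among duplicates (alternative decomposition).

-- ===== PORT A =====
def interordinal_scale (column_name : String) (column_values : List Int) : List (List String) × (List (String × String)) :=
  let sorted_values := PySem.List.sorted (PySem.Set.ofList column_values) (fun x => x) false
  let value_to_indice_per_column : PySem.Dict Int Int :=
    (PySem.List.enumerate sorted_values).foldl (fun d p => d.insert p.2 p.1) PySem.Dict.empty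
  let implications : PySem.Set (String × String) :=
    (PySem.List.pyRange 0 (PySem.List.len sorted_values - 1) 1).foldl
      (fun s i =>
        PySem.Set.add
          (PySem.Set.add s
            (column_name ++ "<=" ++ PySem.Int.toStr (PySem.List.pyGetD sorted_values i 0),
             column_name ++ "<=" ++ PySem.Int.toStr (PySem.List.pyGetD sorted_values (i + 1) 0)))
          (column_name ++ ">=" ++ PySem.Int.toStr (PySem.List.pyGetD sorted_values (i + 1) 0),
           column_name ++ ">=" ++ PySem.Int.toStr (PySem.List.pyGetD sorted_values i 0)))
      PySem.Set.empty
  let result : List (List String) :=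
    column_values.foldl (fun res value =>
      match value_to_indice_per_column.get? value with
      | none => res  -- Python would raise KeyError here; unreachable (every value is in the dict)
      | some indice =>
        let nv1 : PySem.Set String :=
          (PySem.List.pyRange 0 (indice + 1) 1).foldl
            (fun s i => PySem.Set.add s
              (column_name ++ ">=" ++ PySem.Int.toStr (PySem.List.pyGetD sorted_values i 0)))
            PySem.Set.empty
        let nv2 : PySem.Set String :=
          (PySem.List.pyRange indice ((PySem.Dict.size value_to_indice_per_column : Nat) : Int) 1).foldl
            (fun s i => PySem.Set.add s
              (column_name ++ "<=" ++ PySem.Int.toStr (PySem.List.pyGetD sorted_values i 0)))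
            nv1
        res ++ [PySem.List.sorted nv2 (fun x => x) false]) []
  (result, implications)

-- ===== PORT B =====
def interordinal_scale_alt (column_name : String) (column_values : List Int) : List (List String) × (List (String × String)) :=
  let sorted_values := PySem.List.sorted (PySem.Set.ofList column_values) (fun x => x) false
  let ge := sorted_values.map (fun v => column_name ++ ">=" ++ PySem.Int.toStr v)
  let le := sorted_values.map (fun v => column_name ++ "<=" ++ PySem.Int.toStr v)
  let rows : List (List String) :=
    (PySem.List.pyRange 0 (PySem.List.len sorted_values) 1).map
      (fun k => PySem.List.sorted
        (PySem.Set.ofList (PySem.List.slice ge none (some (k + 1)) ++ PySem.List.slice le (some k) none))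
        (fun x => x) false)
  let index : PySem.Dict Int Int :=
    (PySem.List.enumerate sorted_values).foldl (fun d p => d.insert p.2 p.1) PySem.Dict.empty
  let result : List (List String) :=
    column_values.map (fun v =>
      match index.get? v with
      | some k => PySem.List.pyGetD rows k []
      | none => [])
  let implications : PySem.Set (String × String) :=
    (sorted_values.zip (PySem.List.slice sorted_values (some 1) none)).foldl
      (fun s p =>
        PySem.Set.add
          (PySem.Set.add s
            (column_name ++ "<=" ++ PySem.Int.toStr p.1, column_name ++ "<=" ++ PySem.Int.toStr p.2))
          (column_name ++ ">=" ++ PySem.Int.toStr p.2, column_name ++ ">=" ++ PySem.Int.toStr p.1))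
      PySem.Set.empty
  (result, implications)

-- ===== PRECONDITION & SPEC =====
def Spec_interordinal_scale (column_name : String) (column_values : List Int) (out : List (List String) × (List (String × String))) : Prop := out = interordinal_scale_alt column_name column_values
instance (column_name : String) (column_values : List Int) (out : List (List String) × (List (String × String))) : Decidable (Spec_interordinal_scale column_name column_values out) := by unfold Spec_interordinal_scale; infer_instance

-- ===== CLAIM (what is proved, stated in full; the proofs are below) =====
def Claim_equal_interordinal_scale : Prop := ∀ (column_name : String) (column_values : List Int), Dom_interordinal_scale column_name column_values → Spec_interordinal_scale column_name column_values (interordinal_scale column_name column_values)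

-- ===== LEMMAS AND PROOFS =====

-- xs.take n written as a table of its entries (n ≤ |xs|)
theorem pv_take_eq_range_map {α : Type} (xs : List α) (n : Nat) (d : α) (h : n ≤ xs.length) :
    xs.take n = (List.range n).map (fun k => xs.getD k d) := by
  apply List.ext_getElem
  · simp [h]
  · intro i h1 h2
    simp at h1 h2
    simp [List.getElem_take,  Nat.lt_of_lt_of_le h1.1 h]

-- a fold over range(0, n) reading xs[i] is a fold over xs.take n (n ≤ |xs|)
theorem pv_foldl_pyRange_take {α β : Type} (xs : List α) (n : Nat) (d : α)
    (f : β → α → β) (init : β) (h : n ≤ xs.length) :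
    (PySem.List.pyRange 0 (n : Int) 1).foldl (fun s i => f s (PySem.List.pyGetD xs i d)) init
      = (xs.take n).foldl f init := by
  rw [PySem.List.pyRange_one, List.foldl_map, pv_take_eq_range_map xs n d h, List.foldl_map]
  apply PySem.List.foldl_congr_mem
  intro acc k hk
  simp at hk
  simp

-- xs.zip xs.tail as a table of adjacent pairs
theorem pv_zip_tail_eq_range_map {α : Type} (xs : List α) (d : α) :
    xs.zip xs.tail = (List.range (xs.length - 1)).map (fun k => (xs.getD k d, xs.getD (k + 1) d)) := by
  apply List.ext_getElem
  · simp [List.length_zip]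
  · intro i h1 h2
    simp [List.length_zip] at h1
    simp [List.getElem_zip, List.getElem_tail, (by omega : i < xs.length), (by omega : i + 1 < xs.length)]

-- A's index loop over adjacent pairs is B's zip loop
theorem pv_foldl_adjacent {α β : Type} (xs : List α) (d : α)
    (f : β → α → α → β) (init : β) :
    (PySem.List.pyRange 0 (PySem.List.len xs - 1) 1).foldl
        (fun s i => f s (PySem.List.pyGetD xs i d) (PySem.List.pyGetD xs (i + 1) d)) init
      = (xs.zip xs.tail).foldl (fun s p => f s p.1 p.2) init := by
  rw [PySem.List.pyRange_one, List.foldl_map, pv_zip_tail_eq_range_map xs d, List.foldl_map]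
  have hlen : ((PySem.List.len xs - 1) - 0).toNat = xs.length - 1 := by
    simp [PySem.List.len_eq]
  rw [hlen]
  apply PySem.List.foldl_congr_mem
  intro acc k hk
  simp at hk
  have h2 : (k : Int) + 1 = ((k + 1 : Nat) : Int) := by push_cast; ring
  simp only [zero_add]
  rw [h2]
  simp only [PySem.List.pyGetD_natCast]

-- the enumerate-fold dict: its items are the (value, index) pairs
theorem pv_dict_items (sv : List Int) (hnd : sv.Nodup) :
    ((PySem.List.enumerate sv).foldl (fun d p => d.insert p.2 p.1) PySem.Dict.empty).items
      = (PySem.List.enumerate sv).map (fun p => (p.2, p.1)) := by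
  have h := PySem.Dict.items_foldl_insert_fresh (l := PySem.List.enumerate sv)
    (k := fun p => p.2) (v := fun p => p.1) (d := PySem.Dict.empty)
    (by intro a _; simp [PySem.Dict.contains_empty])
    (by simpa [PySem.List.map_snd_enumerate] using hnd)
  simpa using h

theorem pv_dict_get? (sv : List Int) (hnd : sv.Nodup) (v : Int) (i : Int) :
    ((PySem.List.enumerate sv).foldl (fun d p => d.insert p.2 p.1) PySem.Dict.empty).get? v = some i
      ↔ ∃ (k : Nat), k < sv.length ∧ v = sv[k]?.getD 0 ∧ i = (k : Int) := by
  have hkeys : ((PySem.List.enumerate sv).foldl (fun d p => d.insert p.2 p.1) PySem.Dict.empty).keys.Nodup := by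
    apply PySem.Dict.nodup_keys_foldl_insert_key
    simp
  rw [PySem.Dict.get?_eq_some_iff_mem_items _ _ _ hkeys, pv_dict_items sv hnd]
  simp [PySem.List.mem_enumerate_iff]
  constructor
  · rintro ⟨k, ⟨hk, he⟩, hi⟩
    refine ⟨k, hk, ?_, hi.symm⟩
    simp [List.getElem?_eq_getElem hk, he]
  · rintro ⟨k, hk, he, hi⟩
    refine ⟨k, ⟨hk, ?_⟩, hi.symm⟩
    simp [List.getElem?_eq_getElem hk] at he
    exact he.symm

-- the dict built from enumerate(sv) has exactly sv.length entries
theorem pv_dict_size (sv : List Int) (hnd : sv.Nodup) :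
    PySem.Dict.size ((PySem.List.enumerate sv).foldl (fun d p => d.insert p.2 p.1) PySem.Dict.empty)
      = sv.length := by
  unfold PySem.Dict.size
  rw [pv_dict_items sv hnd]
  simp

-- A's two index loops build exactly the attribute multiset take (k+1) of '>=' rows plus drop k of '<=' rows
theorem pv_row_eq (g l : Int → String) (sv : List Int) (k : Nat) (hk : k < sv.length) :
    (PySem.List.pyRange (k : Int) ((sv.length : Nat) : Int) 1).foldl
        (fun s i => PySem.Set.add s (l (PySem.List.pyGetD sv i 0)))
        ((PySem.List.pyRange 0 ((k : Int) + 1) 1).foldl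
          (fun s i => PySem.Set.add s (g (PySem.List.pyGetD sv i 0))) PySem.Set.empty)
      = PySem.Set.ofList ((sv.take (k + 1)).map g ++ (sv.drop k).map l) := by
  have hc : ((k : Int) + 1) = ((k + 1 : Nat) : Int) := by push_cast; ring
  rw [hc, pv_foldl_pyRange_take sv (k + 1) 0 (fun s x => PySem.Set.add s (g x)) _ (by omega),
      PySem.List.foldl_pyRange_pyGetD' sv 0 (fun s x => PySem.Set.add s (l x)) _ (by positivity),
      PySem.Set.ofList_eq_foldl, List.foldl_append, List.foldl_map, List.foldl_map]
  simp [PySem.Set.empty]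

-- ===== VERDICT (by name: the statement is the Claim_ definition above) =====
theorem interordinal_scale_spec : Claim_equal_interordinal_scale := by
  intro cn cvs _
  unfold Spec_interordinal_scale
  simp only [interordinal_scale, interordinal_scale_alt]
  have hnd : (PySem.List.sorted (PySem.Set.ofList cvs) (fun x => x) false).Nodup :=
    ((PySem.List.sorted_perm (PySem.Set.ofList cvs) (fun x => x) false).nodup_iff).mpr
      (PySem.Set.nodup_ofList cvs)
  set sv := PySem.List.sorted (PySem.Set.ofList cvs) (fun x => x) false with hsv
  set d := (PySem.List.enumerate sv).foldl (fun d p => d.insert p.2 p.1) PySem.Dict.empty with hd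
  rw [Prod.mk.injEq]
  constructor
  · -- the result lists agree
    have hget : ∀ v ∈ cvs, ∃ k : Nat, k < sv.length ∧ sv[k]?.getD 0 = v ∧ d.get? v = some (k : Int) := by
      intro v hv
      have hvs : v ∈ sv := (PySem.List.mem_sorted _ _ _ _).mpr ((PySem.Set.mem_ofList _ _).mpr hv)
      obtain ⟨k, hk, hke⟩ := List.mem_iff_getElem.mp hvs
      refine ⟨k, hk, by simp [List.getElem?_eq_getElem hk, hke], ?_⟩
      rw [hd, pv_dict_get? sv hnd]
      exact ⟨k, hk, by simp [List.getElem?_eq_getElem hk, hke], rfl⟩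
    rw [PySem.List.foldl_congr_mem' cvs _
        (fun res value => res ++ [(match d.get? value with
          | none => ([] : List String)
          | some indice => PySem.List.sorted
              ((PySem.List.pyRange indice ((PySem.Dict.size d : Nat) : Int) 1).foldl
                (fun s i => PySem.Set.add s (cn ++ "<=" ++ PySem.Int.toStr (PySem.List.pyGetD sv i 0)))
                ((PySem.List.pyRange 0 (indice + 1) 1).foldl
                  (fun s i => PySem.Set.add s (cn ++ ">=" ++ PySem.Int.toStr (PySem.List.pyGetD sv i 0)))
                  PySem.Set.empty)) (fun x => x) false : List String)]) []
        (by
          intro v hv acc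
          rcases hget v hv with ⟨k, hk, hke, hsome⟩
          simp only [hsome]),
      PySem.List.foldl_append_singleton_eq_map, List.nil_append]
    apply List.map_congr_left
    intro v hv
    rcases hget v hv with ⟨k, hk, hke, hsome⟩
    simp only [hsome]
    rw [show PySem.Dict.size d = sv.length from by rw [hd]; exact pv_dict_size sv hnd]
    rw [PySem.List.pyGetD_map_pyRange_of_nonneg _ _ _ _ (by positivity)
        (by simp [PySem.List.len_eq]; exact_mod_cast hk)]
    rw [pv_row_eq (fun v => cn ++ ">=" ++ PySem.Int.toStr v) (fun v => cn ++ "<=" ++ PySem.Int.toStr v) sv k hk]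
    rw [show ((k : Int) + 1) = ((k + 1 : Nat) : Int) from by push_cast; ring,
        PySem.List.slice_to_natCast, PySem.List.slice_from_natCast,
        List.map_take, List.map_drop]
  · -- the implication sets agree
    rw [PySem.List.slice_from_one]
    exact pv_foldl_adjacent sv 0 (fun s a b =>
      PySem.Set.add (PySem.Set.add s (cn ++ "<=" ++ PySem.Int.toStr a, cn ++ "<=" ++ PySem.Int.toStr b))
        (cn ++ ">=" ++ PySem.Int.toStr b, cn ++ ">=" ++ PySem.Int.toStr a)) PySem.Set.empty
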